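-- pv_equiv track=rewrite | github.com/irxess/IT-3105_AI_Programming_Modules_2015 | Module 6, 2048 ANN/heuristic.py | openCellScore
-- ===== SOURCE A (Python) =====
-- def openCellScore(board):
--     count = 0
--     for cell in board:
--         if cell == 0:
--             count += 1
--     if count > 12:
--         return [1, 1, 1, 1]
--     elif count > 8:
--         return [1, 1, 1, 0]
--     elif count > 5:
--         return [1, 1, 0, 0]
--     elif count > 2:
--         return [1, 0, 0, 0]
--     else:
--         return [0, 0, 0, 0]
-- ===== SOURCE B (Python) =====
-- def openCellScore(board):
--     # Streaming state machine: walk the board once, upgrading the tier vector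
--     # in place each time the running number of empty cells reaches the next
--     # threshold (3, 6, 9, 13 zeros), stopping early at the top tier.
--     gaps = [3, 3, 3, 4]   # zeros needed between successive tier upgrades
--     vec = [0, 0, 0, 0]
--     tier = 0
--     need = gaps[0]
--     for cell in board:
--         if cell != 0:
--             continue
--         need -= 1
--         if need == 0:
--             vec[tier] = 1
--             tier += 1
--             if tier == 4:
--                 break
--             need = gaps[tier]
--     return vec
-- ===== Notes on version B (the rewrite author's own statement) =====
-- stated objective: alternative
-- what changed: Replaces count-then-threshold-ladder with a single-pass streaming state machine that upgrades the tier vector in place each time the running zero count reaches the next threshold, with an early break at the top tier.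
import Mathlib
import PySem

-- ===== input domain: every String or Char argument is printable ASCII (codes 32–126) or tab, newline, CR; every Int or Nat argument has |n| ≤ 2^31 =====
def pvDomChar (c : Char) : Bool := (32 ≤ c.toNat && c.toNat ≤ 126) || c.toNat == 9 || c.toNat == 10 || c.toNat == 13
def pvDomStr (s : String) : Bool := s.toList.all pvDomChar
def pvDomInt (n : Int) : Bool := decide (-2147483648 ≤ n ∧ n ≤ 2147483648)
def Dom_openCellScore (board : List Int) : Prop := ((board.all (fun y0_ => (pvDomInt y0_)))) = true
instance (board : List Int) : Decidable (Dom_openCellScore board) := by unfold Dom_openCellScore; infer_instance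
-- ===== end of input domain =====

-- B replaces count-then-threshold-ladder by a one-pass streaming state machine that
-- upgrades the tier vector in place at every crossed threshold; objective: alternative.

-- ===== PORT A =====
def openCellScore (board : List Int) : List Int :=
  let count := board.foldl (fun count cell => if cell == 0 then count + 1 else count) (0 : Int)
  if count > 12 then [1, 1, 1, 1]
  else if count > 8 then [1, 1, 1, 0]
  else if count > 5 then [1, 1, 0, 0]
  else if count > 2 then [1, 0, 0, 0]
  else [0, 0, 0, 0]

-- ===== PORT B =====
-- the 'for cell in board' loop of Source B, with its early 'break' as a terminated recursion
def pvAltLoop (cells : List Int) (gaps : List Int) (vec : List Int) (tier : Nat) (need : Int) : List Int :=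
  match cells with
  | [] => vec
  | cell :: rest =>
    if cell ≠ 0 then pvAltLoop rest gaps vec tier need
    else
      let need := need - 1
      if need == 0 then
        let vec := vec.set tier 1
        let tier := tier + 1
        if tier == 4 then vec
        else pvAltLoop rest gaps vec tier (gaps.getD tier 0)
      else pvAltLoop rest gaps vec tier need

def openCellScore_alt (board : List Int) : List Int :=
  let gaps : List Int := [3, 3, 3, 4]
  pvAltLoop board gaps [0, 0, 0, 0] 0 (gaps.getD 0 0)

-- ===== PRECONDITION & SPEC =====
def Spec_openCellScore (board : List Int) (out : List Int) : Prop := out = openCellScore_alt board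
instance (board : List Int) (out : List Int) : Decidable (Spec_openCellScore board out) := by unfold Spec_openCellScore; infer_instance

-- ===== CLAIM (what is proved, stated in full; the proofs are below) =====
def Claim_equal_openCellScore : Prop := ∀ (board : List Int), Dom_openCellScore board → Spec_openCellScore board (openCellScore board)

-- ===== LEMMAS AND PROOFS =====

-- tier vector with t leading ones (used only for the proofs)
def pvTvec (t : Nat) : List Int := List.replicate t 1 ++ List.replicate (4 - t) 0

-- final tier reached from (tier, need) after z more zeros; fuel = 4 - tier
def pvRes : Nat → Nat → Int → Int → Nat
  | 0, tier, _, _ => tier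
  | fuel + 1, tier, need, z =>
      if need ≤ z then pvRes fuel (tier + 1) (([3,3,3,4] : List Int).getD (tier + 1) 0) (z - need)
      else tier

theorem pv_count_eq (board : List Int) :
    board.foldl (fun count cell => if cell == 0 then count + 1 else count) (0 : Int)
      = (board.count 0 : Int) := by
  suffices h : ∀ (a : Int), board.foldl (fun count cell => if cell == 0 then count + 1 else count) a
      = a + (board.count 0 : Int) by
    simpa using h 0
  induction board with
  | nil => intro a; simp
  | cons x xs ih =>
    intro a
    simp only [List.foldl_cons]
    rw [ih]
    by_cases hx : x = 0 <;> simp [hx] <;> ring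

theorem pv_set_tvec (t : Nat) (ht : t < 4) : (pvTvec t).set t 1 = pvTvec (t + 1) := by
  interval_cases t <;> decide

theorem pv_gap_pos (t : Nat) (ht : t < 4) : (1:Int) ≤ ([3,3,3,4] : List Int).getD t 0 := by
  interval_cases t <;> decide

theorem pv_loop_eq (xs : List Int) : ∀ (tier : Nat) (need : Int), tier < 4 → 1 ≤ need →
    pvAltLoop xs [3,3,3,4] (pvTvec tier) tier need
      = pvTvec (pvRes (4 - tier) tier need (xs.count 0 : Int)) := by
  induction xs with
  | nil =>
    intro tier need ht hn
    obtain ⟨f, hf⟩ : ∃ f, 4 - tier = f + 1 := ⟨3 - tier, by omega⟩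
    simp only [pvAltLoop, hf, pvRes, List.count_nil]
    rw [if_neg (by omega)]
  | cons x rest ih =>
    intro tier need ht hn
    obtain ⟨f, hf⟩ : ∃ f, 4 - tier = f + 1 := ⟨3 - tier, by omega⟩
    by_cases hx : x = 0
    · subst hx
      simp only [pvAltLoop, if_neg (by simp : ¬ ((0:Int) ≠ 0))]
      have hz : (0:Int) ≤ (rest.count 0 : Int) := by positivity
      have hcnt : (((0 :: rest).count 0 : Nat) : Int) = (rest.count 0 : Int) + 1 := by
        simp
      rw [hcnt, hf]
      by_cases h1 : need = 1
      · subst h1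
        rw [if_pos (by decide)]
        rw [pv_set_tvec tier ht]
        simp only [pvRes, if_pos (show (1:Int) ≤ (rest.count 0 : Int) + 1 by omega)]
        by_cases h4 : tier + 1 = 4
        · rw [if_pos (by simp [h4])]
          have h3 : tier = 3 := by omega
          subst h3
          have hf0 : f = 0 := by omega
          subst hf0
          simp [pvRes]
        · rw [if_neg (by simp; omega), ih (tier + 1) _ (by omega) (pv_gap_pos _ (by omega))]
          have hmf : 4 - (tier + 1) = f := by omega
          rw [hmf]
          congr 2
          omega
      · rw [if_neg (by simp; omega)]
        rw [ih tier (need - 1) ht (by omega)]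
        rw [hf]
        congr 1
        simp only [pvRes]
        split_ifs with ha hb <;> first | rfl | omega | (congr 1; ring)
    · simp only [pvAltLoop, if_pos (by exact hx : x ≠ 0)]
      rw [ih tier need ht hn]
      simp [hx]

theorem pv_res_ladder (z : Int) (hz : 0 ≤ z) :
    pvTvec (pvRes 4 0 3 z)
      = if z > 12 then [1,1,1,1]
        else if z > 8 then [1,1,1,0]
        else if z > 5 then [1,1,0,0]
        else if z > 2 then [1,0,0,0]
        else [0,0,0,0] := by
  simp only [pvRes, List.getD]
  split_ifs <;> simp_all [pvTvec] <;> omega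

-- ===== VERDICT (by name: the statement is the Claim_ definition above) =====
theorem openCellScore_spec : Claim_equal_openCellScore := by
  intro board _
  show openCellScore board = openCellScore_alt board
  unfold openCellScore openCellScore_alt
  rw [pv_count_eq]
  have hB : pvAltLoop board [3,3,3,4] [0,0,0,0] 0 (([3,3,3,4] : List Int).getD 0 0)
      = pvTvec (pvRes 4 0 3 (board.count 0 : Int)) := by
    have := pv_loop_eq board 0 3 (by omega) (by omega)
    simpa [pvTvec] using this
  simp only [hB]
  rw [pv_res_ladder _ (by positivity)]
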